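-- pv_equiv track=rewrite | github.com/StrongerXi/huffmancode | huffmancode.py | int_to_8bitstring
-- ===== SOURCE A (Python) =====
-- def int_to_8bitstring(n):
--
--     if not (0 <= n <= 255):
--         raise Exception("Input int out of bounds : ", n)
--
--     eight_bitstring = ""
--
--     for bit_index in range(0,8):
--         bit_value = 2**(7-bit_index)
--         if n >= bit_value:
--             eight_bitstring += "1"
--             n -= bit_value
--         else:
--             eight_bitstring += "0"
--
--     return eight_bitstring
-- ===== SOURCE B (Python) =====
-- def int_to_8bitstring(n):
--
--     if not (0 <= n <= 255):
--         raise Exception("Input int out of bounds : ", n)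
--
--     bits = []
--     while n > 0:
--         bits.append('1' if n % 2 else '0')
--         n //= 2
--
--     return ''.join(reversed(bits)).zfill(8)
-- ===== Notes on version B (the rewrite author's own statement) =====
-- stated objective: alternative
-- what changed: B extracts bits least-significant-first by repeated halving (remainder, then integer division) into a list, then reverses and zero-pads to the fixed width, instead of A's most-significant-first greedy subtraction of descending powers of two over a fixed-count loop.
import Mathlib
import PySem

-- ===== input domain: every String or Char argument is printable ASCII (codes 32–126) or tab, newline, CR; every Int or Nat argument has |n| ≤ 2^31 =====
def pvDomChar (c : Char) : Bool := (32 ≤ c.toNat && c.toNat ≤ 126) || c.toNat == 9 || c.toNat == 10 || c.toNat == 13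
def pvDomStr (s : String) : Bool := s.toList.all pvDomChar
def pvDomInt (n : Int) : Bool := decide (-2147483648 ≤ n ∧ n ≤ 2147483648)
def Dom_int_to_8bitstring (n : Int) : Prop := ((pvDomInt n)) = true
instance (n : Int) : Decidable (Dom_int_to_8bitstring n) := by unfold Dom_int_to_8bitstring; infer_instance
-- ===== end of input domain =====

-- B builds the bitstring LSB-first by repeated division (n % 2, n //= 2), then reverses and
-- zero-pads to width 8, instead of A's MSB-first greedy subtraction of descending powers of two.


-- ===== PORT A =====
-- A: for bit_index in range(0,8): greedily subtract 2^(7-bit_index), appending '1'/'0'.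
-- The growing string is carried as List Char (PySem convention); String.ofList at the end.
-- Outside 0 ≤ n ≤ 255 the Python raises; excluded by Pre_ (port returns "").
def pvLoopA (n : Int) : List Char :=
  ((PySem.List.pyRange 0 8 1).foldl
    (fun (st : List Char × Int) bit_index =>
      let bit_value : Int := 2 ^ (7 - bit_index).toNat
      if st.2 ≥ bit_value then (st.1 ++ ['1'], st.2 - bit_value)
      else (st.1 ++ ['0'], st.2)) ([], n)).1

def int_to_8bitstring (n : Int) : String :=
  if ¬ (0 ≤ n ∧ n ≤ 255) then ""
  else String.ofList (pvLoopA n)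

-- ===== PORT B =====
-- while n > 0: bits.append('1' if n % 2 else '0'); n //= 2   (structural recursion on n : Nat)
-- fuel = the starting n (n halves each step, so n steps always suffice); purely a totality guard
def pvBitsGo : Nat → Nat → List Char
  | _, 0 => []
  | 0, _+1 => []
  | (f+1), (m+1) => (if (m+1) % 2 = 1 then '1' else '0') :: pvBitsGo f ((m+1) / 2)

def pvBitsB (n : Nat) : List Char := pvBitsGo n n

-- ''.join(reversed(bits)).zfill(8)
def pvPadB (bits : List Char) : List Char :=
  List.replicate (8 - bits.length) '0' ++ bits.reverse

def int_to_8bitstring_alt (n : Int) : String :=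
  if ¬ (0 ≤ n ∧ n ≤ 255) then ""
  else String.ofList (pvPadB (pvBitsB n.toNat))

-- ===== PRECONDITION & SPEC =====
-- Pre_: exactly the inputs on which the Python A returns (it raises an Exception outside 0..255).
def Pre_int_to_8bitstring (n : Int) : Prop := 0 ≤ n ∧ n ≤ 255
instance (n : Int) : Decidable (Pre_int_to_8bitstring n) := by unfold Pre_int_to_8bitstring; infer_instance
def pvWitness_int_to_8bitstring : Int := (170)

def Spec_int_to_8bitstring (n : Int) (out : String) : Prop := out = int_to_8bitstring_alt n
instance (n : Int) (out : String) : Decidable (Spec_int_to_8bitstring n out) := by unfold Spec_int_to_8bitstring; infer_instance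

-- ===== CLAIM (what is proved, stated in full; the proofs are below) =====
def Claim_equal_int_to_8bitstring : Prop := ∀ (n : Int), Dom_int_to_8bitstring n → Pre_int_to_8bitstring n → Spec_int_to_8bitstring n (int_to_8bitstring n)

-- ===== LEMMAS AND PROOFS =====
-- finite check of the two character lists over the 256 admitted values
set_option maxRecDepth 8000 in
theorem pv_fin_check : ∀ (m : Fin 256),
    pvLoopA ((m : Nat) : Int) = pvPadB (pvBitsB (((m : Nat) : Int)).toNat) := by decide

-- ===== VERDICT (by name: the statement is the Claim_ definition above) =====
theorem int_to_8bitstring_spec : Claim_equal_int_to_8bitstring := by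
  intro n _ hpre
  unfold Spec_int_to_8bitstring int_to_8bitstring int_to_8bitstring_alt
  obtain ⟨h0, h255⟩ := hpre
  rw [if_neg (by omega), if_neg (by omega)]
  have hlt : n.toNat < 256 := by omega
  have := pv_fin_check ⟨n.toNat, hlt⟩
  simp only [Int.toNat_of_nonneg h0] at this
  rw [this]
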